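-- pv_equiv track=rewrite | github.com/glitchless/GamesGlitchlessStatic | update-maker.py | diff_index
-- ===== SOURCE A (Python) =====
-- def diff_index(index1, index2):
--     result = {path: None for path in set(index1.keys()) | set(index2.keys())}
--
--     for path, checksum in index2.items():
--         if path not in index1 or checksum != index1[path]:
--             result[path] = 1
--
--     for path, checksum in index1.items():
--         if path not in index2:
--             result[path] = 0
--
--     result = {k: v for k, v in result.items() if v is not None}
--
--     return result
-- ===== SOURCE B (Python) =====
-- def diff_index(index1, index2):
--     suspects = {path for path, _ in set(index1.items()) ^ set(index2.items())}
--     return {path: int(path in index2) for path in suspects}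
-- ===== Notes on version B (the rewrite author's own statement) =====
-- stated objective: alternative
-- what changed: A prefills a None-sentinel dict over the key union, runs two marking passes and filters the sentinels out; B instead takes the set symmetric difference of the two item sets (path, checksum pairs) -- whose keys are exactly the added, removed and changed paths -- and builds the result in one comprehension assigning each suspect path int(path in index2).
import Mathlib
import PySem

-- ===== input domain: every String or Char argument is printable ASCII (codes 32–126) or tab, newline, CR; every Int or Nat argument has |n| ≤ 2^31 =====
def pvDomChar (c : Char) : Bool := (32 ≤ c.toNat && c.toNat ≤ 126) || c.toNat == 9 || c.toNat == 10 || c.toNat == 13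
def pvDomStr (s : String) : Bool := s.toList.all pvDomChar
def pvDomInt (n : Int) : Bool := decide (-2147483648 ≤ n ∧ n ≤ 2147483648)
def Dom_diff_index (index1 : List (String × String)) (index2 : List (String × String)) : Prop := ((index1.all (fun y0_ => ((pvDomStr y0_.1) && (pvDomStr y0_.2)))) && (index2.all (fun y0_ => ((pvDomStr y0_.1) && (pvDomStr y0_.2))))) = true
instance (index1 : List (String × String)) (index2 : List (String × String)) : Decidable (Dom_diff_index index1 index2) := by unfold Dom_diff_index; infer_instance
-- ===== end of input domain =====

-- B replaces A's sentinel/mark/filter protocol (None-prefill over the key union, two marking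
-- passes, final filtering comprehension) by set algebra: the symmetric difference of the two
-- item sets yields exactly the suspect paths, and one comprehension assigns int(path in index2)
-- (objective: alternative). Equivalence of the returned dict (association list; both ports
-- decode the dict arguments with PySem.Dict.ofList).

-- ===== PORT A =====
def diff_index (index1 : List (String × String)) (index2 : List (String × String)) : List (String × Int) :=
  let d1 : PySem.Dict String String := PySem.Dict.ofList index1
  let d2 : PySem.Dict String String := PySem.Dict.ofList index2
  -- result = {path: None for path in set(index1.keys()) | set(index2.keys())}
  let u : PySem.Set String := PySem.Set.union (PySem.Set.ofList d1.keys) (PySem.Set.ofList d2.keys)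
  let r0 : PySem.Dict String (Option Int) :=
    u.foldl (fun r p => r.insert p none) PySem.Dict.empty
  -- for path, checksum in index2.items(): if path not in index1 or checksum != index1[path]: result[path] = 1
  let r1 : PySem.Dict String (Option Int) :=
    d2.items.foldl (fun r y =>
      if !(d1.contains y.1) || (some y.2 != d1.get? y.1) then r.insert y.1 (some 1) else r) r0
  -- for path, checksum in index1.items(): if path not in index2: result[path] = 0
  let r2 : PySem.Dict String (Option Int) :=
    d1.items.foldl (fun r y =>
      if !(d2.contains y.1) then r.insert y.1 (some 0) else r) r1
  -- result = {k: v for k, v in result.items() if v is not None}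
  let r3 : PySem.Dict String Int :=
    r2.items.foldl (fun r kv =>
      match kv.2 with
      | some v => r.insert kv.1 v
      | none => r) PySem.Dict.empty
  r3.items

-- ===== PORT B =====
def diff_index_alt (index1 : List (String × String)) (index2 : List (String × String)) : List (String × Int) :=
  let d1 : PySem.Dict String String := PySem.Dict.ofList index1
  let d2 : PySem.Dict String String := PySem.Dict.ofList index2
  -- suspects = {path for path, _ in set(index1.items()) ^ set(index2.items())}
  let sym : PySem.Set (String × String) :=
    PySem.Set.symmDiff (PySem.Set.ofList d1.items) (PySem.Set.ofList d2.items)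
  let suspects : PySem.Set String := PySem.Set.ofList (sym.map Prod.fst)
  -- return {path: int(path in index2) for path in suspects}
  let r : PySem.Dict String Int :=
    suspects.foldl (fun r p => r.insert p (if d2.contains p then 1 else 0)) PySem.Dict.empty
  r.items

-- ===== PRECONDITION & SPEC =====
def Spec_diff_index (index1 : List (String × String)) (index2 : List (String × String)) (out : List (String × Int)) : Prop := out = diff_index_alt index1 index2
instance (index1 : List (String × String)) (index2 : List (String × String)) (out : List (String × Int)) : Decidable (Spec_diff_index index1 index2 out) := by unfold Spec_diff_index; infer_instance

-- ===== CLAIM (what is proved, stated in full; the proofs are below) =====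
def Claim_equal_diff_index : Prop := ∀ (index1 : List (String × String)) (index2 : List (String × String)), Dom_diff_index index1 index2 → Spec_diff_index index1 index2 (diff_index index1 index2)

-- ===== LEMMAS AND PROOFS =====

-- the common canonical value both ports are reduced to:
-- entries from index1's keys (0 = gone from index2, 1 = checksum changed), then index2-only keys (1)
def canon1 (d1 d2 : PySem.Dict String String) : List (String × Int) :=
  d1.items.filterMap (fun y =>
    if d2.get? y.1 = some y.2 then none
    else some (y.1, if d2.contains y.1 then (1 : Int) else 0))
def canon2 (d1 d2 : PySem.Dict String String) : List (String × Int) :=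
  (d2.keys.filter (fun p => !(d1.contains p))).map (fun p => (p, (1 : Int)))

-- A fold of fresh inserts (keys pairwise distinct, absent from d) appends its entries.
theorem items_foldl_fresh {α ν : Type} (key : α → String) (f : α → Option ν) :
    ∀ (l : List α) (d : PySem.Dict String ν),
      (l.map key).Nodup → (∀ x ∈ l, (f x).isSome → d.contains (key x) = false) →
      (l.foldl (fun r x => match f x with | some v => r.insert (key x) v | none => r) d).items
        = d.items ++ l.filterMap (fun x => (f x).map (fun v => (key x, v))) := by
  intro l
  induction l with
  | nil => intro d _ _; simp
  | cons x t ih =>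
    intro d hn hd
    simp only [List.map_cons, List.nodup_cons] at hn
    cases hf : f x with
    | none =>
      simp only [List.foldl_cons, hf]
      rw [ih d hn.2 (fun y hy hs => hd y (by simp [hy]) hs)]
      simp [hf]
    | some v =>
      simp only [List.foldl_cons, hf]
      have hcont : d.contains (key x) = false := hd x (by simp) (by simp [hf])
      rw [ih (d.insert (key x) v) hn.2 ?_]
      · rw [PySem.Dict.items_insert_of_not_contains d v hcont]
        simp [hf]
      · intro y hy hs
        rw [PySem.Dict.contains_insert]
        have hne : key y ≠ key x := by
          intro h; exact hn.1 (h ▸ List.mem_map_of_mem hy)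
        simp [hne, hd y (by simp [hy]) hs]

-- A fold of conditional overwrites with a constant value rewrites the items in place.
theorem items_foldl_over {α ν : Type} (key : α → String) (c : α → Bool) (v : ν) :
    ∀ (l : List α) (d : PySem.Dict String ν),
      (∀ x ∈ l, c x = true → d.contains (key x) = true) →
      (l.foldl (fun r x => if c x then r.insert (key x) v else r) d).items
        = d.items.map (fun kv => if l.any (fun y => (key y == kv.1) && c y) then (kv.1, v) else kv) := by
  intro l
  induction l with
  | nil => intro d _; simp
  | cons x t ih =>
    intro d hc
    cases hcx : c x with
    | false =>
      simp only [List.foldl_cons, hcx, Bool.false_eq_true, reduceIte]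
      rw [ih d (fun y hy => hc y (by simp [hy]))]
      simp [hcx]
    | true =>
      simp only [List.foldl_cons, hcx, reduceIte]
      have hcont : d.contains (key x) = true := hc x (by simp) hcx
      rw [ih (d.insert (key x) v) ?_]
      · rw [PySem.Dict.items_insert_of_contains d v hcont]
        rw [List.map_map]
        apply List.map_congr_left
        intro kv _
        by_cases hk : kv.1 = key x
        · simp [Function.comp, hk, hcx]
        · have h1 : (kv.1 == key x) = false := by simp [hk]
          have h2 : (key x == kv.1) = false := by
            simp only [beq_eq_false_iff_ne, ne_eq]
            exact fun h => hk h.symm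
          simp [Function.comp, h1, h2, hcx]
      · intro y hy hcy
        rw [PySem.Dict.contains_insert]
        simp [hc y (by simp [hy]) hcy]

-- keys are preserved by the overwrite fold (values only are rewritten)
theorem keys_foldl_over {α ν : Type} (key : α → String) (c : α → Bool) (v : ν)
    (l : List α) (d : PySem.Dict String ν)
    (hc : ∀ x ∈ l, c x = true → d.contains (key x) = true) :
    (l.foldl (fun r x => if c x then r.insert (key x) v else r) d).keys = d.keys := by
  show ((l.foldl (fun r x => if c x then r.insert (key x) v else r) d).items.map Prod.fst) = d.items.map Prod.fst
  rw [items_foldl_over key c v l d hc, List.map_map]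
  apply List.map_congr_left
  intro kv _
  by_cases h : l.any (fun y => (key y == kv.1) && c y) <;> simp [Function.comp, h]

-- with pairwise-distinct keys, an 'any' over pairs keyed at y.1 reads off y's own entry
theorem any_key_unique {ν : Type} (l : List (String × ν)) (g : String × ν → Bool)
    (h : (l.map Prod.fst).Nodup) (y : String × ν) (hy : y ∈ l) :
    l.any (fun z => (z.1 == y.1) && g z) = g y := by
  induction l with
  | nil => cases hy
  | cons a t ih =>
    simp only [List.map_cons, List.nodup_cons] at h
    rcases List.mem_cons.mp hy with rfl | hyt
    · have hz : ∀ z ∈ t, ¬ ((z.1 == y.1) && g z) = true := by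
        intro z hz
        have : z.1 ≠ y.1 := by
          intro he; exact h.1 (he ▸ List.mem_map_of_mem hz)
        simp [this]
      rw [List.any_cons, List.any_eq_false.mpr hz]
      simp
    · have hne : a.1 ≠ y.1 := by
        intro he; exact h.1 (he ▸ List.mem_map_of_mem hyt)
      have hb : (a.1 == y.1) = false := by simp [hne]
      rw [List.any_cons, ih h.2 hyt, hb]
      simp

-- an 'any' keyed at an absent key is false
theorem any_key_absent {ν : Type} (l : List (String × ν)) (g : String × ν → Bool)
    (k : String) (hk : k ∉ l.map Prod.fst) :
    l.any (fun z => (z.1 == k) && g z) = false := by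
  apply List.any_eq_false.mpr
  intro z hz
  have : z.1 ≠ k := by
    intro he; exact hk (he ▸ List.mem_map_of_mem hz)
  simp [this]

-- A's initialisation loop: insert `none` for every key of the (nodup) union list
theorem items_init (u : List String) (hn : u.Nodup) :
    (u.foldl (fun (r : PySem.Dict String (Option Int)) p => r.insert p none) PySem.Dict.empty).items
      = u.map (fun k => (k, (none : Option Int))) := by
  have h := items_foldl_fresh (ν := Option Int) (fun p => p) (fun _ => some none) u PySem.Dict.empty
      (by simpa using hn) (by intro x _ _; simp)
  calc (u.foldl (fun (r : PySem.Dict String (Option Int)) p => r.insert p none) PySem.Dict.empty).items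
      = PySem.Dict.empty.items
          ++ u.filterMap (fun x => (some (none : Option Int)).map (fun v => (x, v))) := h
    _ = u.map (fun k => (k, (none : Option Int))) := by
      simp [PySem.Dict.empty]

-- A's last line: the value-filtering dict comprehension over items with nodup keys
theorem items_comprehension (l : List (String × Option Int)) (hn : (l.map Prod.fst).Nodup) :
    (l.foldl (fun (r : PySem.Dict String Int) kv =>
        match kv.2 with
        | some v => r.insert kv.1 v
        | none => r) PySem.Dict.empty).items
      = l.filterMap (fun kv => kv.2.map (fun v => (kv.1, v))) := by
  suffices h : ∀ (l : List (String × Option Int)) (d : PySem.Dict String Int),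
      (l.map Prod.fst).Nodup → (∀ kv ∈ l, kv.2.isSome → d.contains kv.1 = false) →
      (l.foldl (fun (r : PySem.Dict String Int) kv =>
          match kv.2 with
          | some v => r.insert kv.1 v
          | none => r) d).items
        = d.items ++ l.filterMap (fun kv => kv.2.map (fun v => (kv.1, v))) by
    have := h l PySem.Dict.empty hn (by intro kv _ _; simp)
    simpa [PySem.Dict.empty] using this
  intro l
  induction l with
  | nil => intro d _ _; simp
  | cons x t ih =>
    intro d hn hd
    simp only [List.map_cons, List.nodup_cons] at hn
    cases hf : x.2 with
    | none =>
      simp only [List.foldl_cons, hf]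
      rw [ih d hn.2 (fun y hy hs => hd y (by simp [hy]) hs)]
      simp [hf]
    | some v =>
      simp only [List.foldl_cons, hf]
      have hcont : d.contains x.1 = false := hd x (by simp) (by simp [hf])
      rw [ih (d.insert x.1 v) hn.2 ?_]
      · rw [PySem.Dict.items_insert_of_not_contains d v hcont]
        simp [hf]
      · intro y hy hs
        rw [PySem.Dict.contains_insert]
        have hne : y.1 ≠ x.1 := by
          intro h; exact hn.1 (h ▸ List.mem_map_of_mem hy)
        simp [hne, hd y (by simp [hy]) hs]

-- filter-then-map as a filterMap
theorem map_filter_eq_filterMap {α β : Type} (p : α → Bool) (g : α → β) (l : List α) :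
    (l.filter p).map g = l.filterMap (fun a => if p a then some (g a) else none) := by
  induction l with
  | nil => rfl
  | cons x t ih =>
    by_cases hx : p x <;> simp [hx, ih]

-- for a dict with nodup keys, pair membership in items is exactly get?
theorem contains_items_iff (d : PySem.Dict String String) (h : d.keys.Nodup)
    (y : String × String) :
    d.items.contains y = true ↔ d.get? y.1 = some y.2 := by
  constructor
  · intro hc
    have hm : (y.1, y.2) ∈ d.items := by simpa using hc
    exact PySem.Dict.get?_of_mem_items d hm h
  · intro hg
    have hm : (y.1, y.2) ∈ d.items := PySem.Dict.mem_items_of_get?_eq_some d hg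
    simpa using hm

-- A's value equals the canonical one
theorem coreA (d1 d2 : PySem.Dict String String)
    (h1 : d1.keys.Nodup) (h2 : d2.keys.Nodup) :
    (List.foldl
        (fun (r : PySem.Dict String Int) kv =>
          match kv.2 with
          | some v => r.insert kv.1 v
          | none => r) PySem.Dict.empty
        (List.foldl (fun r y =>
            if !(d2.contains y.1) then r.insert y.1 (some 0) else r)
          (List.foldl (fun r y =>
              if !(d1.contains y.1) || (some y.2 != d1.get? y.1) then r.insert y.1 (some 1) else r)
            (List.foldl (fun (r : PySem.Dict String (Option Int)) p => r.insert p none)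
              PySem.Dict.empty
              (PySem.Set.union (PySem.Set.ofList d1.keys) (PySem.Set.ofList d2.keys)))
            d2.items)
          d1.items).items).items
      = canon1 d1 d2 ++ canon2 d1 d2 := by
  set U : List String := d1.keys ++ d2.keys.filter (fun p => !(PySem.Set.contains d1.keys p)) with hUdef
  have hcK1 : ∀ p, PySem.Set.contains d1.keys p = true ↔ p ∈ d1.keys := by
    intro p; exact PySem.Set.contains_iff d1.keys p
  have hu : PySem.Set.union (PySem.Set.ofList d1.keys) (PySem.Set.ofList d2.keys) = U := by
    show PySem.Set.update (PySem.Set.ofList d1.keys) (PySem.Set.ofList d2.keys) = U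
    rw [PySem.Set.update_eq_append_filter, PySem.Set.ofList_ofList,
      PySem.Set.ofList_eq_self_of_nodup _ h1, PySem.Set.ofList_eq_self_of_nodup _ h2, hUdef]
  have hnU : U.Nodup := by
    rw [hUdef]
    refine List.Nodup.append h1 (h2.filter _) ?_
    intro a ha hb
    have hpred := (List.mem_filter.mp hb).2
    rw [Bool.not_eq_eq_eq_not, Bool.not_true] at hpred
    rw [← hcK1 a, hpred] at ha
    exact Bool.false_ne_true ha
  have hmemU : ∀ p, p ∈ U ↔ (p ∈ d1.keys ∨ p ∈ d2.keys) := by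
    intro p
    rw [hUdef]
    by_cases hp1 : p ∈ d1.keys
    · simp [hp1]
    · simp [hp1, List.mem_filter]
  rw [hu]
  set R0 : PySem.Dict String (Option Int) :=
    List.foldl (fun (r : PySem.Dict String (Option Int)) p => r.insert p none) PySem.Dict.empty U with hR0
  set R1 : PySem.Dict String (Option Int) :=
    List.foldl (fun r y =>
      if !(d1.contains y.1) || (some y.2 != d1.get? y.1) then r.insert y.1 (some 1) else r) R0 d2.items with hR1
  set R2 : PySem.Dict String (Option Int) :=
    List.foldl (fun r y =>
      if !(d2.contains y.1) then r.insert y.1 (some 0) else r) R1 d1.items with hR2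
  have h0 : R0.items = U.map (fun k => (k, (none : Option Int))) := items_init U hnU
  have hk0 : R0.keys = U := by
    show List.map (fun x => x.1) R0.items = U
    rw [h0]; simp [Function.comp_def]
  have hcond1 : ∀ y ∈ d2.items, (!(d1.contains y.1) || (some y.2 != d1.get? y.1)) = true →
      R0.contains y.1 = true := by
    intro y hy _
    rw [PySem.Dict.contains_eq_decide_mem_keys, hk0]
    have : y.1 ∈ d2.keys := List.mem_map_of_mem hy
    simp [hmemU, this]
  have hs1 : R1.items = R0.items.map (fun kv =>
      if d2.items.any (fun y => (y.1 == kv.1) && (!(d1.contains y.1) || (some y.2 != d1.get? y.1)))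
      then (kv.1, some (1 : Int)) else kv) :=
    items_foldl_over Prod.fst
      (fun y => !(d1.contains y.1) || (some y.2 != d1.get? y.1)) (some 1) d2.items R0 hcond1
  have hi1 : R1.items = U.map (fun k =>
      if d2.items.any (fun y => (y.1 == k) && (!(d1.contains y.1) || (some y.2 != d1.get? y.1)))
      then (k, some (1 : Int)) else (k, (none : Option Int))) := by
    rw [hs1, h0, List.map_map]
    apply List.map_congr_left
    intro k _
    by_cases hA : d2.items.any (fun y => (y.1 == k) && (!(d1.contains y.1) || (some y.2 != d1.get? y.1))) <;>
      simp [Function.comp, hA]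
  have hk1 : R1.keys = U := by
    have h := keys_foldl_over Prod.fst
      (fun y => !(d1.contains y.1) || (some y.2 != d1.get? y.1)) (some (1 : Int)) d2.items R0 hcond1
    rw [hR1]
    exact h.trans hk0
  have hcond2 : ∀ y ∈ d1.items, (!(d2.contains y.1)) = true → R1.contains y.1 = true := by
    intro y hy _
    rw [PySem.Dict.contains_eq_decide_mem_keys, hk1]
    have : y.1 ∈ d1.keys := List.mem_map_of_mem hy
    simp [hmemU, this]
  have hs2 : R2.items = R1.items.map (fun kv =>
      if d1.items.any (fun y => (y.1 == kv.1) && (!(d2.contains y.1)))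
      then (kv.1, some (0 : Int)) else kv) :=
    items_foldl_over Prod.fst (fun y => !(d2.contains y.1)) (some 0) d1.items R1 hcond2
  have hi2 : R2.items = U.map (fun k => (k,
      if d1.items.any (fun y => (y.1 == k) && (!(d2.contains y.1))) then some (0 : Int)
      else if d2.items.any (fun y => (y.1 == k) && (!(d1.contains y.1) || (some y.2 != d1.get? y.1)))
      then some 1 else none)) := by
    rw [hs2, hi1, List.map_map]
    apply List.map_congr_left
    intro k _
    by_cases hA0 : d1.items.any (fun y => (y.1 == k) && (!(d2.contains y.1))) <;>
      by_cases hA1 : d2.items.any (fun y => (y.1 == k) && (!(d1.contains y.1) || (some y.2 != d1.get? y.1))) <;>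
      simp [Function.comp, hA0, hA1]
  have hkm2 : R2.items.map Prod.fst = U := by rw [hi2]; simp [Function.comp_def]
  have h3 : (List.foldl (fun (r : PySem.Dict String Int) kv =>
      match kv.2 with
      | some v => r.insert kv.1 v
      | none => r) PySem.Dict.empty R2.items).items
      = R2.items.filterMap (fun kv => kv.2.map (fun v => (kv.1, v))) :=
    items_comprehension R2.items (by rw [hkm2]; exact hnU)
  rw [h3, hi2, List.filterMap_map, hUdef, List.filterMap_append]
  congr 1
  · -- kept entries from index1's keys
    show (List.map (fun x => x.1) d1.items).filterMap _ = _
    rw [List.filterMap_map]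
    unfold canon1
    apply List.filterMap_congr
    intro y hy
    have hA0 : d1.items.any (fun z => (z.1 == y.1) && (!(d2.contains z.1))) = !(d2.contains y.1) :=
      any_key_unique d1.items (fun z => !(d2.contains z.1)) h1 y hy
    have hd1get : d1.get? y.1 = some y.2 :=
      PySem.Dict.get?_of_mem_items d1 (by simpa using hy) h1
    have hd1c : d1.contains y.1 = true := by
      rw [PySem.Dict.contains_eq_decide_mem_keys]
      have hm : y.1 ∈ d1.keys := List.mem_map_of_mem hy
      simp [hm]
    by_cases hc2 : d2.contains y.1
    · obtain ⟨z, hz, hz1⟩ := List.mem_map.mp (by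
        rw [PySem.Dict.contains_eq_decide_mem_keys] at hc2
        simpa using hc2 : y.1 ∈ d2.keys)
      have hd2get : d2.get? y.1 = some z.2 := by
        rw [← hz1]
        exact PySem.Dict.get?_of_mem_items d2 (by simpa using hz) h2
      have hA1 : d2.items.any (fun w => (w.1 == y.1) && (!(d1.contains w.1) || (some w.2 != d1.get? w.1)))
          = (some z.2 != some y.2) := by
        rw [← hz1]
        rw [any_key_unique d2.items (fun w => !(d1.contains w.1) || (some w.2 != d1.get? w.1)) h2 z hz]
        rw [hz1, hd1c, hd1get]
        simp
      by_cases hne : z.2 = y.2 <;>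
        simp [Function.comp, hA0, hA1, hc2, hd2get, hne]
    · have hcf : d2.contains y.1 = false := by simpa using hc2
      have hgn : d2.get? y.1 = none := by
        rw [PySem.Dict.get?_eq_none_iff_contains]; exact hcf
      simp [Function.comp, hA0, hcf, hgn]
  · -- entries from index2-only keys
    unfold canon2
    rw [List.filterMap_filter,
      map_filter_eq_filterMap (fun p => !(d1.contains p)) (fun p => (p, (1 : Int))) d2.keys]
    apply List.filterMap_congr
    intro p hp
    by_cases hp1 : p ∈ d1.keys
    · have hsc : PySem.Set.contains d1.keys p = true := (hcK1 p).mpr hp1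
      have hdc : d1.contains p = true := by
        rw [PySem.Dict.contains_eq_decide_mem_keys]; simp [hp1]
      simp [hdc]
      intro hcontra
      exact absurd hp1 hcontra
    · have hsc : PySem.Set.contains d1.keys p = false := by
        rw [← Bool.not_eq_true, hcK1 p]; exact hp1
      have hdc : d1.contains p = false := by
        rw [PySem.Dict.contains_eq_decide_mem_keys]; simp [hp1]
      have hA0 : d1.items.any (fun z => (z.1 == p) && (!(d2.contains z.1))) = false :=
        any_key_absent d1.items (fun z => !(d2.contains z.1)) p hp1
      obtain ⟨z, hz, hz1⟩ := List.mem_map.mp hp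
      have hA1 : d2.items.any (fun w => (w.1 == p) && (!(d1.contains w.1) || (some w.2 != d1.get? w.1)))
          = true := by
        rw [← hz1]
        rw [any_key_unique d2.items (fun w => !(d1.contains w.1) || (some w.2 != d1.get? w.1)) h2 z hz]
        rw [hz1, hdc]
        simp
      simp [Function.comp, hdc, hA0, hA1]
      exact hp1

-- B's value equals the canonical one
theorem coreB (d1 d2 : PySem.Dict String String)
    (h1 : d1.keys.Nodup) (h2 : d2.keys.Nodup) :
    (List.foldl (fun (r : PySem.Dict String Int) p =>
        r.insert p (if d2.contains p then 1 else 0)) PySem.Dict.empty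
      (PySem.Set.ofList
        ((PySem.Set.symmDiff (PySem.Set.ofList d1.items) (PySem.Set.ofList d2.items)).map Prod.fst))).items
      = canon1 d1 d2 ++ canon2 d1 d2 := by
  have hn1 : d1.items.Nodup := List.Nodup.of_map _ h1
  have hn2 : d2.items.Nodup := List.Nodup.of_map _ h2
  rw [PySem.Set.ofList_eq_self_of_nodup _ hn1, PySem.Set.ofList_eq_self_of_nodup _ hn2]
  have hsym : PySem.Set.symmDiff d1.items d2.items
      = d1.items.filter (fun y => !(d2.items.contains y))
        ++ d2.items.filter (fun y => !(d1.items.contains y)) := rfl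
  rw [hsym, List.map_append]
  set P1 : List String := (d1.items.filter (fun y => !(d2.items.contains y))).map Prod.fst with hP1def
  set P2 : List String := (d2.items.filter (fun y => !(d1.items.contains y))).map Prod.fst with hP2def
  have hsubP1 : P1.Sublist d1.keys := List.Sublist.map Prod.fst List.filter_sublist
  have hsubP2 : P2.Sublist d2.keys := List.Sublist.map Prod.fst List.filter_sublist
  have hnP1 : P1.Nodup := hsubP1.nodup h1
  have hnP2 : P2.Nodup := hsubP2.nodup h2
  rw [PySem.Set.ofList_append, PySem.Set.ofList_eq_self_of_nodup _ hnP1,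
    PySem.Set.update_eq_append_filter, PySem.Set.ofList_eq_self_of_nodup _ hnP2]
  -- the second block of suspects is exactly the index2-only keys, in index2 order
  have hfix : P2.filter (fun p => !(PySem.Set.contains P1 p))
      = d2.keys.filter (fun p => !(d1.contains p)) := by
    show (List.map Prod.fst _).filter _ = (d2.items.map (fun x => x.1)).filter _
    rw [List.filter_map, List.filter_map, List.filter_filter]
    congr 1
    apply List.filter_congr
    intro y hy
    simp only [Function.comp]
    by_cases hk1 : y.1 ∈ d1.keys
    · have hdc : d1.contains y.1 = true := by
        rw [PySem.Dict.contains_eq_decide_mem_keys]; simp [hk1]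
      obtain ⟨z, hz, hz1⟩ := List.mem_map.mp hk1
      by_cases hvz : z.2 = y.2
      · -- same pair is in d1.items: y is not in the symmetric difference at all
        have hyz : y ∈ d1.items := by
          have : z = y := by
            have := Prod.ext hz1 hvz
            simpa using this
          simpa [this] using hz
        simp [hdc]
        intro _
        exact hyz
      · -- checksums differ: y.1 already occurs in P1, so it is filtered out here too
        have hg2 : d2.get? y.1 = some y.2 := PySem.Dict.get?_of_mem_items d2 (by simpa using hy) h2
        have hzm : z ∉ d2.items := by
          intro hm
          have hgz : d2.get? z.1 = some z.2 := PySem.Dict.get?_of_mem_items d2 (by simpa using hm) h2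
          rw [hz1, hg2] at hgz
          exact hvz (by simpa using hgz.symm)
        have hzc : d2.items.contains z = false := by simpa using hzm
        have hzin : z.1 ∈ P1 := by
          rw [hP1def]
          exact List.mem_map_of_mem (List.mem_filter.mpr ⟨hz, by simp [hzm]⟩)
        have hPc : PySem.Set.contains P1 y.1 = true := by
          rw [PySem.Set.contains_iff]; rw [← hz1]; exact hzin
        simp [hdc]
        exact fun h => absurd ((PySem.Set.contains_iff P1 y.1).mp hPc) h
    · have hdc : d1.contains y.1 = false := by
        rw [PySem.Dict.contains_eq_decide_mem_keys]; simp [hk1]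
      have hyc : d1.items.contains y = false := by
        rw [Bool.eq_false_iff]
        intro hc
        exact hk1 (List.mem_map_of_mem (by simpa using hc))
      have hPc : PySem.Set.contains P1 y.1 = false := by
        rw [← Bool.not_eq_true, PySem.Set.contains_iff]
        intro hmem
        rw [hP1def] at hmem
        obtain ⟨w, hw, hw1⟩ := List.mem_map.mp hmem
        exact hk1 (hw1 ▸ List.mem_map_of_mem (List.mem_filter.mp hw).1)
      simp [hdc]
      exact ⟨by simpa using hPc, by simpa using hyc⟩
  rw [hfix]
  -- the suspects are pairwise distinct, so the dict build appends one entry per suspect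
  have hnall : (P1 ++ d2.keys.filter (fun p => !(d1.contains p))).Nodup := by
    refine List.Nodup.append hnP1 (h2.filter _) ?_
    intro a ha hb
    have hpred := (List.mem_filter.mp hb).2
    obtain ⟨w, hw, hw1⟩ := List.mem_map.mp (hP1def ▸ ha)
    have : d1.contains a = true := by
      rw [PySem.Dict.contains_eq_decide_mem_keys]
      have : a ∈ d1.keys := hw1 ▸ List.mem_map_of_mem (List.mem_filter.mp hw).1
      simp [this]
    simp [this] at hpred
  have hbody : (fun (r : PySem.Dict String Int) p => r.insert p (if d2.contains p then 1 else 0))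
      = (fun r p => match (some (if d2.contains p then (1 : Int) else 0)) with
                    | some v => r.insert p v
                    | none => r) := by
    funext r p; rfl
  rw [hbody, items_foldl_fresh (fun p => p) (fun p => some (if d2.contains p then (1 : Int) else 0))
    _ PySem.Dict.empty (by simpa using hnall) (by intro x _ _; simp)]
  have hemp : (PySem.Dict.empty : PySem.Dict String Int).items = [] := rfl
  rw [hemp, List.nil_append, List.filterMap_append]
  congr 1
  · -- the index1 part matches canon1
    rw [hP1def, List.filterMap_map, List.filterMap_filter]
    unfold canon1
    apply List.filterMap_congr
    intro y hy
    have hci := contains_items_iff d2 h2 y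
    by_cases hc : d2.items.contains y
    · have hg : d2.get? y.1 = some y.2 := hci.mp hc
      simp [Function.comp, hg]
      exact (by simpa using hc : y ∈ d2.items)
    · have hg : d2.get? y.1 ≠ some y.2 := fun h => hc (hci.mpr h)
      simp [Function.comp, hg]
      exact fun hm => hc (by simpa using hm)
  · -- the index2-only part matches canon2
    unfold canon2
    rw [List.filterMap_filter,
      map_filter_eq_filterMap (fun p => !(d1.contains p)) (fun p => (p, (1 : Int))) d2.keys]
    apply List.filterMap_congr
    intro p hp
    by_cases hd : d1.contains p
    · simp [hd]
    · have hc2 : d2.contains p = true := by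
        rw [PySem.Dict.contains_eq_decide_mem_keys]; simp [hp]
      simp [hd, hc2]

-- ===== VERDICT (by name: the statement is the Claim_ definition above) =====
theorem diff_index_spec : Claim_equal_diff_index := by
  intro index1 index2 _
  show diff_index index1 index2 = diff_index_alt index1 index2
  rw [show diff_index index1 index2 = canon1 (PySem.Dict.ofList index1) (PySem.Dict.ofList index2)
      ++ canon2 (PySem.Dict.ofList index1) (PySem.Dict.ofList index2) from
    coreA _ _ (PySem.Dict.nodup_keys_ofList index1) (PySem.Dict.nodup_keys_ofList index2)]
  exact (coreB _ _ (PySem.Dict.nodup_keys_ofList index1) (PySem.Dict.nodup_keys_ofList index2)).symm
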